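-- pv_equiv track=rewrite | github.com/Shonitbar/IOT_SMART_HOME | room_config.py | get_sensor_type_from_topic
-- ===== SOURCE A (Python) =====
-- ROOMS = {
--     "Living Room": {
--         "room_id": 1,
--         "sensors": {
--             "temperature": "pr/home/room1/temperature",
--             "humidity": "pr/home/room1/humidity",
--             "light": "pr/home/room1/light"
--         }
--     },
--     "Bedroom": {
--         "room_id": 2,
--         "sensors": {
--             "temperature": "pr/home/room2/temperature",
--             "humidity": "pr/home/room2/humidity",
--             "light": "pr/home/room2/light"
--         }
--     },
--     "Kitchen": {
--         "room_id": 3,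
--         "sensors": {
--             "temperature": "pr/home/room3/temperature",
--             "humidity": "pr/home/room3/humidity",
--             "light": "pr/home/room3/light"
--         }
--     },
--     "Bathroom": {
--         "room_id": 4,
--         "sensors": {
--             "temperature": "pr/home/room4/temperature",
--             "humidity": "pr/home/room4/humidity",
--             "light": "pr/home/room4/light"
--         }
--     },
--     "Office": {
--         "room_id": 5,
--         "sensors": {
--             "temperature": "pr/home/room5/temperature",
--             "humidity": "pr/home/room5/humidity",
--             "light": "pr/home/room5/light"
--         }
--     },
--     "Garage": {
--         "room_id": 6,
--         "sensors": {
--             "temperature": "pr/home/room6/temperature",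
--             "humidity": "pr/home/room6/humidity",
--             "light": "pr/home/room6/light"
--         }
--     }
-- }
--
-- CUSTOM_TOPIC_MAP = {
--     # Map your actual sensor topics here
--     "pr/home/5976397/sts": ("Living Room", "humidity"),
--     "pr/home/room1/humidity": ("Living Room", "humidity"),
--     "pr/home/room2/humidity": ("Bedroom", "humidity"),
--     # Add more custom mappings below:
--     # "pr/home/relay_123_YY/temperature": ("Kitchen", "temperature"),
-- }
--
-- def get_sensor_type_from_topic(topic):
--     # First check custom topic map
--     if topic in CUSTOM_TOPIC_MAP:
--         return CUSTOM_TOPIC_MAP[topic][1]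
--
--     # Then check standard format
--     for room_name, room_data in ROOMS.items():
--         for sensor_name, sensor_topic in room_data["sensors"].items():
--             if sensor_topic == topic:
--                 return sensor_name
--     return None
-- ===== SOURCE B (Python) =====
-- ROOMS = {
--     "Living Room": {"room_id": 1, "sensors": {"temperature": "pr/home/room1/temperature", "humidity": "pr/home/room1/humidity", "light": "pr/home/room1/light"}},
--     "Bedroom": {"room_id": 2, "sensors": {"temperature": "pr/home/room2/temperature", "humidity": "pr/home/room2/humidity", "light": "pr/home/room2/light"}},
--     "Kitchen": {"room_id": 3, "sensors": {"temperature": "pr/home/room3/temperature", "humidity": "pr/home/room3/humidity", "light": "pr/home/room3/light"}},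
--     "Bathroom": {"room_id": 4, "sensors": {"temperature": "pr/home/room4/temperature", "humidity": "pr/home/room4/humidity", "light": "pr/home/room4/light"}},
--     "Office": {"room_id": 5, "sensors": {"temperature": "pr/home/room5/temperature", "humidity": "pr/home/room5/humidity", "light": "pr/home/room5/light"}},
--     "Garage": {"room_id": 6, "sensors": {"temperature": "pr/home/room6/temperature", "humidity": "pr/home/room6/humidity", "light": "pr/home/room6/light"}},
-- }
--
-- CUSTOM_TOPIC_MAP = {
--     "pr/home/5976397/sts": ("Living Room", "humidity"),
--     "pr/home/room1/humidity": ("Living Room", "humidity"),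
--     "pr/home/room2/humidity": ("Bedroom", "humidity"),
-- }
--
-- # B parses the topic instead of scanning tables: every standard topic is
-- # "pr/home/room<N>/<sensor>" with N in 1..6 and the sensor name is the last
-- # path component, so we test the room prefix and read the sensor off the tail.
-- ROOM_PREFIXES = ("pr/home/room1/", "pr/home/room2/", "pr/home/room3/",
--                  "pr/home/room4/", "pr/home/room5/", "pr/home/room6/")
-- SENSOR_TYPES = ("temperature", "humidity", "light")
--
-- def get_sensor_type_from_topic(topic):
--     if topic == "pr/home/5976397/sts":
--         return "humidity"
--     for prefix in ROOM_PREFIXES: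
--         if topic.startswith(prefix):
--             sensor = topic[len(prefix):]
--             if sensor in SENSOR_TYPES:
--                 return sensor
--     return None
-- ===== Notes on version B (the rewrite author's own statement) =====
-- stated objective: alternative
-- what changed: B parses the topic string (room prefix test + last path component) instead of A's nested scan over the ROOMS tables and the separate custom-map lookup; correct because every table topic has the shape pr/home/roomN/<sensor> and the custom entries agree with that shape except the one literal sts topic.
import Mathlib
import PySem

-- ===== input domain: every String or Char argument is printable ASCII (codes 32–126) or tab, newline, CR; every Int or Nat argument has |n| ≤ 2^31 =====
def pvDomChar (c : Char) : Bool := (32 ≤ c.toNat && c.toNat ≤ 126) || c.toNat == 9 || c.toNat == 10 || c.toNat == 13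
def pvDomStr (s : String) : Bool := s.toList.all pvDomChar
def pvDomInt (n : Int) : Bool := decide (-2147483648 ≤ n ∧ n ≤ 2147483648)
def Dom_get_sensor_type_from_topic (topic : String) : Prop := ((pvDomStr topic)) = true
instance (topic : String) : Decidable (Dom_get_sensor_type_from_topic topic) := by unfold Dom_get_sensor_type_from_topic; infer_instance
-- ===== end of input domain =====

-- B parses the topic (room-prefix test + last path component) instead of A's nested scan over the ROOMS tables plus a custom-map lookup (objective: alternative).

-- ===== PORT A =====
-- module data: ROOMS as (room_name, (room_id, sensors)) and CUSTOM_TOPIC_MAP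
def pvRooms : List (String × (Int × List (String × String))) :=
  [ ("Living Room", (1, [("temperature", "pr/home/room1/temperature"), ("humidity", "pr/home/room1/humidity"), ("light", "pr/home/room1/light")])),
    ("Bedroom",     (2, [("temperature", "pr/home/room2/temperature"), ("humidity", "pr/home/room2/humidity"), ("light", "pr/home/room2/light")])),
    ("Kitchen",     (3, [("temperature", "pr/home/room3/temperature"), ("humidity", "pr/home/room3/humidity"), ("light", "pr/home/room3/light")])),
    ("Bathroom",    (4, [("temperature", "pr/home/room4/temperature"), ("humidity", "pr/home/room4/humidity"), ("light", "pr/home/room4/light")])),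
    ("Office",      (5, [("temperature", "pr/home/room5/temperature"), ("humidity", "pr/home/room5/humidity"), ("light", "pr/home/room5/light")])),
    ("Garage",      (6, [("temperature", "pr/home/room6/temperature"), ("humidity", "pr/home/room6/humidity"), ("light", "pr/home/room6/light")])) ]

def pvCustomTopicMap : PySem.Dict String (String × String) :=
  PySem.Dict.ofList
    [ ("pr/home/5976397/sts", ("Living Room", "humidity")),
      ("pr/home/room1/humidity", ("Living Room", "humidity")),
      ("pr/home/room2/humidity", ("Bedroom", "humidity")) ]

-- inner 'for sensor_name, sensor_topic in room_data["sensors"].items(): if sensor_topic == topic: return sensor_name'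
def pvInnerA (topic : String) : List (String × String) → Option String
  | [] => none
  | (sensor_name, sensor_topic) :: rest =>
      if sensor_topic == topic then some sensor_name else pvInnerA topic rest

-- outer 'for room_name, room_data in ROOMS.items(): …'
def pvOuterA (topic : String) : List (String × (Int × List (String × String))) → Option String
  | [] => none
  | (_, (_, sensors)) :: rest =>
      match pvInnerA topic sensors with
      | some s => some s
      | none => pvOuterA topic rest

def get_sensor_type_from_topic (topic : String) : Option String :=
  match pvCustomTopicMap.get? topic with
  | some pair => some pair.2
  | none => pvOuterA topic pvRooms

-- ===== PORT B =====
def pvRoomPrefixes : List String :=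
  ["pr/home/room1/", "pr/home/room2/", "pr/home/room3/",
   "pr/home/room4/", "pr/home/room5/", "pr/home/room6/"]

def pvSensorTypes : List String := ["temperature", "humidity", "light"]

-- 'for prefix in ROOM_PREFIXES: if topic.startswith(prefix): sensor = topic[len(prefix):]; if sensor in SENSOR_TYPES: return sensor'
def pvLoopB (topic : String) : List String → Option String
  | [] => none
  | pfx :: rest =>
      if PySem.Str.startswith topic pfx then
        let sensor := PySem.Str.slice topic (some (PySem.Str.len pfx)) none
        if pvSensorTypes.contains sensor then some sensor else pvLoopB topic rest
      else pvLoopB topic rest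

def get_sensor_type_from_topic_alt (topic : String) : Option String :=
  if topic == "pr/home/5976397/sts" then some "humidity"
  else pvLoopB topic pvRoomPrefixes

-- ===== PRECONDITION & SPEC =====
def Spec_get_sensor_type_from_topic (topic : String) (out : Option String) : Prop := out = get_sensor_type_from_topic_alt topic
instance (topic : String) (out : Option String) : Decidable (Spec_get_sensor_type_from_topic topic out) := by unfold Spec_get_sensor_type_from_topic; infer_instance

-- ===== CLAIM (what is proved, stated in full; the proofs are below) =====
def Claim_equal_get_sensor_type_from_topic : Prop := ∀ (topic : String), Dom_get_sensor_type_from_topic topic → Spec_get_sensor_type_from_topic topic (get_sensor_type_from_topic topic)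

-- ===== LEMMAS AND PROOFS =====

-- if topic starts with pfx, then topic is pfx followed by the slice topic[len(pfx):]
theorem pvParse (topic pfx : String) (hp : PySem.Str.startswith topic pfx = true) :
    topic = pfx ++ PySem.Str.slice topic (some (PySem.Str.len pfx)) none := by
  rw [PySem.Str.startswith_eq] at hp
  have h1 : pfx.toList <+: topic.toList := (PySem.Chars.startswith_iff _ _).mp hp
  have h2 : (PySem.Str.slice topic (some (PySem.Str.len pfx)) none).toList
      = topic.toList.drop pfx.toList.length := by
    rw [PySem.Str.toList_slice, PySem.Chars.slice_eq_listSlice, PySem.Str.len_eq,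
      PySem.List.slice_from _ (by positivity)]
    simp [String.length_toList]
  have h3 := List.prefix_iff_eq_append.mp h1
  apply String.toList_inj.mp
  rw [String.toList_append, h2]
  exact h3.symm

-- a loop step on a prefix that leads to no admissible topic is skipped
theorem pvStep (topic pfx : String) (rest : List String)
    (h : ∀ s : String, pvSensorTypes.contains s = true → ¬ (pfx ++ s = topic)) :
    pvLoopB topic (pfx :: rest) = pvLoopB topic rest := by
  have e : pvLoopB topic (pfx :: rest) =
      (if PySem.Str.startswith topic pfx = true then
        (if pvSensorTypes.contains (PySem.Str.slice topic (some (PySem.Str.len pfx)) none) = true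
         then some (PySem.Str.slice topic (some (PySem.Str.len pfx)) none)
         else pvLoopB topic rest)
       else pvLoopB topic rest) := rfl
  rw [e]
  by_cases hsw : PySem.Str.startswith topic pfx = true
  · rw [if_pos hsw]
    by_cases hc : pvSensorTypes.contains (PySem.Str.slice topic (some (PySem.Str.len pfx)) none) = true
    · exact absurd (pvParse topic pfx hsw).symm (h _ hc)
    · rw [if_neg hc]
  · rw [if_neg hsw]

-- the custom map's literal item list
theorem pvCustomTopicMap_eq : pvCustomTopicMap = PySem.Dict.mk
  [ ("pr/home/5976397/sts", ("Living Room", "humidity")),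
    ("pr/home/room1/humidity", ("Living Room", "humidity")),
    ("pr/home/room2/humidity", ("Bedroom", "humidity")) ] := by decide

theorem pvLoopB_nil (topic : String) : pvLoopB topic [] = none := rfl

-- ===== VERDICT (by name: the statement is the Claim_ definition above) =====
set_option maxHeartbeats 2000000 in
theorem get_sensor_type_from_topic_spec : Claim_equal_get_sensor_type_from_topic := by
  intro topic _
  unfold Spec_get_sensor_type_from_topic
  by_cases h0 : ("pr/home/room1/temperature" = topic)
  · subst h0; decide
  by_cases h1 : ("pr/home/room1/humidity" = topic)
  · subst h1; decide
  by_cases h2 : ("pr/home/room1/light" = topic)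
  · subst h2; decide
  by_cases h3 : ("pr/home/room2/temperature" = topic)
  · subst h3; decide
  by_cases h4 : ("pr/home/room2/humidity" = topic)
  · subst h4; decide
  by_cases h5 : ("pr/home/room2/light" = topic)
  · subst h5; decide
  by_cases h6 : ("pr/home/room3/temperature" = topic)
  · subst h6; decide
  by_cases h7 : ("pr/home/room3/humidity" = topic)
  · subst h7; decide
  by_cases h8 : ("pr/home/room3/light" = topic)
  · subst h8; decide
  by_cases h9 : ("pr/home/room4/temperature" = topic)
  · subst h9; decide
  by_cases h10 : ("pr/home/room4/humidity" = topic)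
  · subst h10; decide
  by_cases h11 : ("pr/home/room4/light" = topic)
  · subst h11; decide
  by_cases h12 : ("pr/home/room5/temperature" = topic)
  · subst h12; decide
  by_cases h13 : ("pr/home/room5/humidity" = topic)
  · subst h13; decide
  by_cases h14 : ("pr/home/room5/light" = topic)
  · subst h14; decide
  by_cases h15 : ("pr/home/room6/temperature" = topic)
  · subst h15; decide
  by_cases h16 : ("pr/home/room6/humidity" = topic)
  · subst h16; decide
  by_cases h17 : ("pr/home/room6/light" = topic)
  · subst h17; decide
  by_cases h18 : ("pr/home/5976397/sts" = topic)
  · subst h18; decide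
  have hA : get_sensor_type_from_topic topic = none := by
    simp [get_sensor_type_from_topic, pvOuterA, pvInnerA, pvRooms, pvCustomTopicMap_eq,
      PySem.Dict.get?, h0, h1, h2, h3, h4, h5, h6, h7, h8, h9, h10, h11, h12, h13, h14,
      h15, h16, h17, h18]
  have hB : get_sensor_type_from_topic_alt topic = none := by
    have hbeq : (topic == "pr/home/5976397/sts") = false := by
      simp only [beq_eq_false_iff_ne]; exact fun e => h18 e.symm
    simp only [get_sensor_type_from_topic_alt, hbeq, if_false, Bool.false_eq_true,
      pvRoomPrefixes]
    rw [pvStep topic "pr/home/room1/" _ (by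
          intro s hs e; simp [pvSensorTypes] at hs
          rcases hs with rfl | rfl | rfl
          · exact h0 (by rw [← e]; decide)
          · exact h1 (by rw [← e]; decide)
          · exact h2 (by rw [← e]; decide)),
        pvStep topic "pr/home/room2/" _ (by
          intro s hs e; simp [pvSensorTypes] at hs
          rcases hs with rfl | rfl | rfl
          · exact h3 (by rw [← e]; decide)
          · exact h4 (by rw [← e]; decide)
          · exact h5 (by rw [← e]; decide)),
        pvStep topic "pr/home/room3/" _ (by
          intro s hs e; simp [pvSensorTypes] at hs
          rcases hs with rfl | rfl | rfl
          · exact h6 (by rw [← e]; decide)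
          · exact h7 (by rw [← e]; decide)
          · exact h8 (by rw [← e]; decide)),
        pvStep topic "pr/home/room4/" _ (by
          intro s hs e; simp [pvSensorTypes] at hs
          rcases hs with rfl | rfl | rfl
          · exact h9 (by rw [← e]; decide)
          · exact h10 (by rw [← e]; decide)
          · exact h11 (by rw [← e]; decide)),
        pvStep topic "pr/home/room5/" _ (by
          intro s hs e; simp [pvSensorTypes] at hs
          rcases hs with rfl | rfl | rfl
          · exact h12 (by rw [← e]; decide)
          · exact h13 (by rw [← e]; decide)
          · exact h14 (by rw [← e]; decide)),
        pvStep topic "pr/home/room6/" _ (by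
          intro s hs e; simp [pvSensorTypes] at hs
          rcases hs with rfl | rfl | rfl
          · exact h15 (by rw [← e]; decide)
          · exact h16 (by rw [← e]; decide)
          · exact h17 (by rw [← e]; decide)),
        pvLoopB_nil]
  rw [hA, hB]
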